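-- pv_equiv track=rewrite | github.com/Ag3497120/verantyx-v6 | synth_results/3befdf3e.py | transform
-- ===== SOURCE A (Python) =====
-- def transform(grid):
--     rows = len(grid)
--     cols = len(grid[0])
--
--     # Find bounding box of non-zero region
--     r_min = min(r for r in range(rows) for c in range(cols) if grid[r][c] != 0)
--     r_max = max(r for r in range(rows) for c in range(cols) if grid[r][c] != 0)
--     c_min = min(c for r in range(rows) for c in range(cols) if grid[r][c] != 0)
--     c_max = max(c for r in range(rows) for c in range(cols) if grid[r][c] != 0)
--
--     border_color = grid[r_min][c_min]  # corner = border
--     # inner color: find a cell inside (not on boundary of box)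
--     inner_color = None
--     for r in range(r_min+1, r_max):
--         for c in range(c_min+1, c_max):
--             if grid[r][c] != border_color:
--                 inner_color = grid[r][c]
--                 break
--         if inner_color is not None:
--             break
--
--     if inner_color is None:
--         return grid
--
--     # inner region size
--     inner_h = r_max - r_min - 1  # rows inside border
--     inner_w = c_max - c_min - 1
--
--     # Build output
--     result = [row[:] for row in grid]
--
--     # Swap colors inside box: where it was border_color -> inner_color, vice versa
--     for r in range(r_min, r_max+1):
--         for c in range(c_min, c_max+1):
--             if grid[r][c] == border_color:
--                 result[r][c] = inner_color
--             elif grid[r][c] == inner_color: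
--                 result[r][c] = border_color
--
--     # Add extension strips of border_color (original outer) around the box
--     # Extension size = inner dimensions
--     ext_h = inner_h  # extend by inner_h rows top and bottom
--     ext_w = inner_w  # extend by inner_w cols left and right
--
--     # Top strips
--     for dr in range(1, ext_h+1):
--         r = r_min - dr
--         if r >= 0:
--             for c in range(c_min, c_max+1):
--                 result[r][c] = border_color
--
--     # Bottom strips
--     for dr in range(1, ext_h+1):
--         r = r_max + dr
--         if r < rows:
--             for c in range(c_min, c_max+1):
--                 result[r][c] = border_color
--
--     # Left strips
--     for dc in range(1, ext_w+1):
--         c = c_min - dc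
--         if c >= 0:
--             for r in range(r_min, r_max+1):
--                 result[r][c] = border_color
--
--     # Right strips
--     for dc in range(1, ext_w+1):
--         c = c_max + dc
--         if c < cols:
--             for r in range(r_min, r_max+1):
--                 result[r][c] = border_color
--
--     return result
-- ===== SOURCE B (Python) =====
-- def transform(grid):
--     # Single pass computes the bounding box; output is built per-cell from the
--     # box geometry instead of mutating a copy with five paint loops.
--     bb = None
--     for r, row in enumerate(grid):
--         for c, v in enumerate(row):
--             if v != 0:
--                 if bb is None:
--                     bb = (r, r, c, c)
--                 else:
--                     a, b, x, y = bb
--                     bb = (min(a, r), max(b, r), min(x, c), max(y, c))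
--     if bb is None:
--         return grid
--     r_min, r_max, c_min, c_max = bb
--
--     border = grid[r_min][c_min]
--     inner = next((grid[r][c]
--                   for r in range(r_min + 1, r_max)
--                   for c in range(c_min + 1, c_max)
--                   if grid[r][c] != border), None)
--     if inner is None:
--         return grid
--
--     ext_h = r_max - r_min - 1
--     ext_w = c_max - c_min - 1
--
--     def color(r, c, v):
--         if r_min <= r <= r_max and c_min <= c <= c_max:
--             if v == border:
--                 return inner
--             if v == inner:
--                 return border
--             return v
--         if c_min <= c <= c_max and (r_min - ext_h <= r < r_min or r_max < r <= r_max + ext_h):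
--             return border
--         if r_min <= r <= r_max and (c_min - ext_w <= c < c_min or c_max < c <= c_max + ext_w):
--             return border
--         return v
--
--     return [[color(r, c, v) for c, v in enumerate(row)] for r, row in enumerate(grid)]
-- ===== Notes on version B (the rewrite author's own statement) =====
-- stated objective: alternative
-- what changed: B finds the bounding box in one pass instead of four full-grid min/max scans and builds the output functionally, computing each cell's color from the box geometry in a single per-cell map, instead of copying the grid and mutating it with a swap loop plus four border-extension strip loops.
-- outside the precondition, e.g. on transform([[-1], [0], [0, -38, 199]]): A returns [[-1], [0], [0, -38, 199]], B raises IndexError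
import Mathlib
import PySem

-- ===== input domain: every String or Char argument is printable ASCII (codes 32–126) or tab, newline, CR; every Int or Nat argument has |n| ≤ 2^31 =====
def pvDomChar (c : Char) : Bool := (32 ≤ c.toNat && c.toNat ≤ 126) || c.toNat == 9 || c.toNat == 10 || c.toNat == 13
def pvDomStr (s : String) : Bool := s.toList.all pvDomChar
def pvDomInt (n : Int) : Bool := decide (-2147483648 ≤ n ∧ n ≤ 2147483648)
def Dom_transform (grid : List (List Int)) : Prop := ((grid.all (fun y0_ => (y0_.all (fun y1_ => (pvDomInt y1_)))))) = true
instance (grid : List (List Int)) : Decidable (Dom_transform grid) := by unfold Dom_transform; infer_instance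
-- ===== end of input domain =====

-- B computes the bounding box in one pass and builds the output per-cell from the box
-- geometry (a single map), instead of A's four min/max scans plus copy-and-mutate with
-- a swap loop and four border-extension strip loops; same asymptotic cost ("alternative").

-- ===== PORT A =====
-- shared low-level accessors: grid[r][c] and result[r][c] = v; inside Pre_transform every
-- index used is in range, where pyGetD/modify/set agree exactly with Python indexing.
def pvGet (g : List (List Int)) (r c : Int) : Int :=
  PySem.List.pyGetD (PySem.List.pyGetD g r []) c 0

def pvSet (g : List (List Int)) (r c : Int) (v : Int) : List (List Int) :=
  g.modify r.toNat (fun row => row.set c.toNat v)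

-- row-major (r, c) pairs of the rectangle [a,b) × [x,y) (the nested `for r … for c …`)
def pvPairs (a b x y : Int) : List (Int × Int) :=
  (PySem.List.pyRange a b).flatMap (fun r => (PySem.List.pyRange x y).map (fun c => (r, c)))

-- the list of (r, c) with grid[r][c] != 0 that A's four generator expressions range over
def pvNZ (grid : List (List Int)) (rows cols : Int) : List (Int × Int) :=
  (PySem.List.pyRange 0 rows).flatMap (fun r =>
    ((PySem.List.pyRange 0 cols).filter (fun c => pvGet grid r c ≠ 0)).map (fun c => (r, c)))

-- A's tail after `inner_color` was found: copy, swap colors in the box, paint the four strips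
def pvPaint (grid : List (List Int)) (rows cols rmin rmax cmin cmax border inner : Int) :
    List (List Int) :=
  let exth := rmax - rmin - 1
  let extw := cmax - cmin - 1
  let result := grid.map (fun row => row)            -- [row[:] for row in grid]
  let result := (PySem.List.pyRange rmin (rmax + 1)).foldl (fun res r =>
      (PySem.List.pyRange cmin (cmax + 1)).foldl (fun res c =>
        if pvGet grid r c = border then pvSet res r c inner
        else if pvGet grid r c = inner then pvSet res r c border
        else res) res) result
  let result := (PySem.List.pyRange 1 (exth + 1)).foldl (fun res dr =>   -- top strips
      let r := rmin - dr
      if 0 ≤ r then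
        (PySem.List.pyRange cmin (cmax + 1)).foldl (fun res c => pvSet res r c border) res
      else res) result
  let result := (PySem.List.pyRange 1 (exth + 1)).foldl (fun res dr =>   -- bottom strips
      let r := rmax + dr
      if r < rows then
        (PySem.List.pyRange cmin (cmax + 1)).foldl (fun res c => pvSet res r c border) res
      else res) result
  let result := (PySem.List.pyRange 1 (extw + 1)).foldl (fun res dc =>   -- left strips
      let c := cmin - dc
      if 0 ≤ c then
        (PySem.List.pyRange rmin (rmax + 1)).foldl (fun res r => pvSet res r c border) res
      else res) result
  let result := (PySem.List.pyRange 1 (extw + 1)).foldl (fun res dc =>   -- right strips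
      let c := cmax + dc
      if c < cols then
        (PySem.List.pyRange rmin (rmax + 1)).foldl (fun res r => pvSet res r c border) res
      else res) result
  result

def transform (grid : List (List Int)) : List (List Int) :=
  let rows : Int := grid.length
  let cols : Int := (PySem.List.pyGetD grid 0 []).length
  let nz := pvNZ grid rows cols
  match PySem.List.min? (nz.map Prod.fst) (fun y => y),
        PySem.List.max? (nz.map Prod.fst) (fun y => y),
        PySem.List.min? (nz.map Prod.snd) (fun y => y),
        PySem.List.max? (nz.map Prod.snd) (fun y => y) with
  | some rmin, some rmax, some cmin, some cmax =>
    let border := pvGet grid rmin cmin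
    -- the break-out-of-both-loops search = first cell of the row-major inner region that differs
    match ((pvPairs (rmin + 1) rmax (cmin + 1) cmax).find?
            (fun p => pvGet grid p.1 p.2 ≠ border)).map (fun p => pvGet grid p.1 p.2) with
    | none => grid
    | some inner => pvPaint grid rows cols rmin rmax cmin cmax border inner
  | _, _, _, _ => grid      -- Python raises ValueError (min of empty sequence); outside Pre_

-- ===== PORT B =====
def pvBBox (grid : List (List Int)) : Option (Int × Int × Int × Int) :=
  (PySem.List.enumerate grid).foldl (fun bb (rrow : Int × List Int) =>
    (PySem.List.enumerate rrow.2).foldl (fun bb (cv : Int × Int) =>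
      if cv.2 ≠ 0 then
        match bb with
        | none => some (rrow.1, rrow.1, cv.1, cv.1)
        | some (a, b, x, y) => some (min a rrow.1, max b rrow.1, min x cv.1, max y cv.1)
      else bb) bb) none

def pvColor (rmin rmax cmin cmax exth extw border inner r c v : Int) : Int :=
  if rmin ≤ r ∧ r ≤ rmax ∧ cmin ≤ c ∧ c ≤ cmax then
    if v = border then inner else if v = inner then border else v
  else if (cmin ≤ c ∧ c ≤ cmax) ∧
          ((rmin - exth ≤ r ∧ r < rmin) ∨ (rmax < r ∧ r ≤ rmax + exth)) then border
  else if (rmin ≤ r ∧ r ≤ rmax) ∧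
          ((cmin - extw ≤ c ∧ c < cmin) ∨ (cmax < c ∧ c ≤ cmax + extw)) then border
  else v

def pvRender (grid : List (List Int)) (rmin rmax cmin cmax border inner : Int) :
    List (List Int) :=
  let exth := rmax - rmin - 1
  let extw := cmax - cmin - 1
  (PySem.List.enumerate grid).map (fun rrow =>
    (PySem.List.enumerate rrow.2).map (fun cv =>
      pvColor rmin rmax cmin cmax exth extw border inner rrow.1 cv.1 cv.2))

def transform_alt (grid : List (List Int)) : List (List Int) :=
  match pvBBox grid with
  | none => grid
  | some (rmin, rmax, cmin, cmax) =>
    let border := pvGet grid rmin cmin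
    -- next((grid[r][c] for r … for c … if grid[r][c] != border), None)
    match (((pvPairs (rmin + 1) rmax (cmin + 1) cmax).filter
            (fun p => pvGet grid p.1 p.2 ≠ border)).map (fun p => pvGet grid p.1 p.2)).head? with
    | none => grid
    | some inner => pvRender grid rmin rmax cmin cmax border inner

-- ===== PRECONDITION & SPEC =====
-- Pre_ excludes the empty grid and all-zero grids (A raises IndexError/ValueError there) and
-- ragged grids: rows shorter than the first make A raise IndexError, while longer rows' extra
-- cells are silently ignored by A's cols-bounded scans — an accident of A's implementation.
def Pre_transform (grid : List (List Int)) : Prop :=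
  grid ≠ [] ∧ (∀ row ∈ grid, row.length = (grid.headD []).length) ∧
    ∃ row ∈ grid, ∃ v ∈ row, v ≠ 0
instance (grid : List (List Int)) : Decidable (Pre_transform grid) := by
  unfold Pre_transform; infer_instance

def pvWitness_transform : List (List Int) := [[1, 1, 1], [1, 2, 1], [1, 1, 1]]

def Spec_transform (grid : List (List Int)) (out : List (List Int)) : Prop :=
  out = transform_alt grid
instance (grid : List (List Int)) (out : List (List Int)) : Decidable (Spec_transform grid out) := by
  unfold Spec_transform; infer_instance

-- ===== CLAIM (what is proved, stated in full; the proofs are below) =====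
def Claim_equal_transform : Prop :=
  ∀ (grid : List (List Int)), Dom_transform grid → Pre_transform grid →
    Spec_transform grid (transform grid)

-- ===== LEMMAS AND PROOFS =====

lemma foldl_flatMap {α β γ : Type} (l : List α) (h : α → List β) (f : γ → β → γ) (init : γ) :
    (l.flatMap h).foldl f init = l.foldl (fun acc a => (h a).foldl f acc) init := by
  induction l generalizing init with
  | nil => rfl
  | cons x t ih => simp [List.flatMap_cons, List.foldl_append, ih]

lemma pvSet_length (g : List (List Int)) (r c v : Int) : (pvSet g r c v).length = g.length := by
  simp [pvSet]

lemma pvSet_rowLen (g : List (List Int)) (r c v : Int) (i : Nat) :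
    ((pvSet g r c v).getD i []).length = (g.getD i []).length := by
  simp only [pvSet, List.getD_eq_getElem?_getD, List.getElem?_modify]
  cases h : g[i]? with
  | none => simp
  | some row => by_cases hr : r.toNat = i <;> simp [hr]

lemma pvGet_nonneg (g : List (List Int)) (i j : Int) (hi : 0 ≤ i) (hj : 0 ≤ j) :
    pvGet g i j = (g.getD i.toNat []).getD j.toNat 0 := by
  simp [pvGet, PySem.List.pyGetD_of_nonneg _ _ hi, PySem.List.pyGetD_of_nonneg _ _ hj]

lemma pvGet_pvSet (g : List (List Int)) (r c v i j : Int)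
    (hr : 0 ≤ r) (hc : 0 ≤ c) (hi : 0 ≤ i) (hj : 0 ≤ j) :
    pvGet (pvSet g r c v) i j =
      if i = r ∧ j = c ∧ r.toNat < g.length ∧ c.toNat < (g.getD r.toNat []).length then v
      else pvGet g i j := by
  rw [pvGet_nonneg _ _ _ hi hj, pvGet_nonneg _ _ _ hi hj]
  simp only [pvSet, List.getD_eq_getElem?_getD, List.getElem?_modify]
  by_cases hir : i = r
  · obtain rfl := hir
    simp only [true_and]
    cases hg : g[i.toNat]? with
    | none => simp
    | some row =>
      have hlen : i.toNat < g.length := (List.getElem?_eq_some_iff.mp hg).1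
      simp only [Option.map_some, Option.getD_some, List.getElem?_set, hlen, true_and, if_true]
      by_cases hjc : j = c
      · have htn : c.toNat = j.toNat := by omega
        by_cases hcl : c.toNat < row.length
        · simp [htn, hjc, hcl, htn ▸ hcl]
        · have h3 : ¬ j.toNat < row.length := by omega
          simp [htn, hjc, hcl, List.getElem?_set, h3]
      · have htn : ¬ c.toNat = j.toNat := by omega
        simp [htn, hjc]
  · have htn : ¬ r.toNat = i.toNat := by omega
    simp [htn, hir]

lemma foldl_writes_shape (f : Int × Int → Int) (ps : List (Int × Int)) (g : List (List Int)) :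
    (ps.foldl (fun acc p => pvSet acc p.1 p.2 (f p)) g).length = g.length ∧
    ∀ i : Nat, ((ps.foldl (fun acc p => pvSet acc p.1 p.2 (f p)) g).getD i []).length
      = (g.getD i []).length := by
  induction ps generalizing g with
  | nil => exact ⟨rfl, fun _ => rfl⟩
  | cons p t ih =>
    simp only [List.foldl_cons]
    refine ⟨?_, fun i => ?_⟩
    · rw [(ih _).1, pvSet_length]
    · rw [(ih _).2, pvSet_rowLen]

lemma pvGet_foldl_writes (f : Int × Int → Int) (ps : List (Int × Int)) (g : List (List Int))
    (i j : Int) (hps : ∀ p ∈ ps, 0 ≤ p.1 ∧ 0 ≤ p.2) (hi : 0 ≤ i) (hj : 0 ≤ j) :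
    pvGet (ps.foldl (fun acc p => pvSet acc p.1 p.2 (f p)) g) i j =
      if (i, j) ∈ ps ∧ i.toNat < g.length ∧ j.toNat < (g.getD i.toNat []).length then f (i, j)
      else pvGet g i j := by
  induction ps generalizing g with
  | nil => simp
  | cons p t ih =>
    have hp := hps p List.mem_cons_self
    simp only [List.foldl_cons]
    rw [ih (pvSet g p.1 p.2 (f p)) (fun q hq => hps q (List.mem_cons_of_mem _ hq)),
        pvSet_length, pvSet_rowLen,
        pvGet_pvSet g p.1 p.2 (f p) i j hp.1 hp.2 hi hj]
    by_cases hR : i.toNat < g.length ∧ j.toNat < (g.getD i.toNat []).length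
    · by_cases hm : (i, j) ∈ t
      · rw [if_pos ⟨hm, hR⟩, if_pos ⟨List.mem_cons_of_mem _ hm, hR⟩]
      · rw [if_neg (by tauto : ¬ ((i, j) ∈ t ∧ i.toNat < g.length
            ∧ j.toNat < (g.getD i.toNat []).length))]
        by_cases he : (i, j) = p
        · have h1 : i = p.1 := by rw [← he]
          have h2 : j = p.2 := by rw [← he]
          have e1 : p.1.toNat = i.toNat := by rw [h1]
          have e2 : p.2.toNat = j.toNat := by rw [h2]
          rw [if_pos ⟨h1, h2, by omega, by rw [e1, e2]; exact hR.2⟩,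
              if_pos ⟨by rw [he]; exact List.mem_cons_self, hR⟩, he]
        · rw [if_neg (fun hc => he (Prod.ext_iff.mpr ⟨hc.1, hc.2.1⟩)),
              if_neg (by simp [List.mem_cons, he, hm])]
    · have ncond : ¬ (i = p.1 ∧ j = p.2 ∧ p.1.toNat < g.length
          ∧ p.2.toNat < (g.getD p.1.toNat []).length) := by
        rintro ⟨h1, h2, h3, h4⟩
        have e1 : p.1.toNat = i.toNat := by rw [h1]
        have e2 : p.2.toNat = j.toNat := by rw [h2]
        rw [e1, e2] at h4
        exact hR ⟨by omega, h4⟩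
      rw [if_neg (by tauto : ¬ ((i, j) ∈ t ∧ i.toNat < g.length
            ∧ j.toNat < (g.getD i.toNat []).length)), if_neg ncond,
          if_neg (by tauto : ¬ ((i, j) ∈ p :: t ∧ i.toNat < g.length
            ∧ j.toNat < (g.getD i.toNat []).length))]

lemma mem_pvPairs (a b x y r c : Int) :
    (r, c) ∈ pvPairs a b x y ↔ (a ≤ r ∧ r < b) ∧ (x ≤ c ∧ c < y) := by
  simp [pvPairs, List.mem_flatMap, PySem.List.mem_pyRange_one]

-- 'if p(x): <update>' inside a for-loop = the same loop over the filtered list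
lemma foldl_if_filter_prop {α β : Type} (l : List α) (p : α → Prop) [DecidablePred p]
    (f : β → α → β) (init : β) :
    l.foldl (fun st x => if p x then f st x else st) init
      = (l.filter (fun x => decide (p x))).foldl f init := by
  induction l generalizing init with
  | nil => rfl
  | cons x t ih => by_cases h : p x <;> simp [h, ih]

lemma foldl_nested_pairs {γ : Type} (a b x y : Int) (f : γ → Int × Int → γ) (init : γ) :
    (pvPairs a b x y).foldl f init
      = (PySem.List.pyRange a b).foldl (fun acc r =>
          (PySem.List.pyRange x y).foldl (fun acc c => f acc (r, c)) acc) init := by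
  unfold pvPairs
  rw [foldl_flatMap]
  simp [List.foldl_map]

lemma getElem_enumerate {α : Type} (xs : List α) (d : α) (i : Nat)
    (h : i < (PySem.List.enumerate xs).length) :
    (PySem.List.enumerate xs)[i] = ((i : Int), PySem.List.pyGetD xs (i : Int) d) := by
  rw [List.getElem_of_eq (PySem.List.enumerate_eq_map_pyRange xs d)]
  rw [List.getElem_map]
  rw [PySem.List.getElem_pyRange_one]
  simp

-- the flat write list of A's five paint loops, and the per-position written value
def pvW (grid : List (List Int)) (rows cols rmin rmax cmin cmax border inner : Int) :
    List (Int × Int) :=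
  let exth := rmax - rmin - 1
  let extw := cmax - cmin - 1
  (pvPairs rmin (rmax + 1) cmin (cmax + 1)).filter
      (fun p => decide (pvGet grid p.1 p.2 = border ∨ pvGet grid p.1 p.2 = inner))
  ++ (PySem.List.pyRange 1 (exth + 1)).flatMap (fun dr =>
        if 0 ≤ rmin - dr then (PySem.List.pyRange cmin (cmax + 1)).map (fun c => (rmin - dr, c))
        else [])
  ++ (PySem.List.pyRange 1 (exth + 1)).flatMap (fun dr =>
        if rmax + dr < rows then (PySem.List.pyRange cmin (cmax + 1)).map (fun c => (rmax + dr, c))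
        else [])
  ++ (PySem.List.pyRange 1 (extw + 1)).flatMap (fun dc =>
        if 0 ≤ cmin - dc then (PySem.List.pyRange rmin (rmax + 1)).map (fun r => (r, cmin - dc))
        else [])
  ++ (PySem.List.pyRange 1 (extw + 1)).flatMap (fun dc =>
        if cmax + dc < cols then (PySem.List.pyRange rmin (rmax + 1)).map (fun r => (r, cmax + dc))
        else [])

def pvF (grid : List (List Int)) (rmin rmax cmin cmax border inner : Int) (p : Int × Int) : Int :=
  pvColor rmin rmax cmin cmax (rmax - rmin - 1) (cmax - cmin - 1) border inner p.1 p.2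
    (pvGet grid p.1 p.2)

lemma stage_swap (grid : List (List Int)) (rmin rmax cmin cmax border inner : Int)
    (X : List (List Int)) :
    ((pvPairs rmin (rmax + 1) cmin (cmax + 1)).filter
        (fun p => decide (pvGet grid p.1 p.2 = border ∨ pvGet grid p.1 p.2 = inner))).foldl
      (fun acc p => pvSet acc p.1 p.2 (pvF grid rmin rmax cmin cmax border inner p)) X
    = (PySem.List.pyRange rmin (rmax + 1)).foldl (fun res r =>
        (PySem.List.pyRange cmin (cmax + 1)).foldl (fun res c =>
          if pvGet grid r c = border then pvSet res r c inner
          else if pvGet grid r c = inner then pvSet res r c border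
          else res) res) X := by
  rw [← foldl_if_filter_prop (pvPairs rmin (rmax + 1) cmin (cmax + 1))
        (fun p => pvGet grid p.1 p.2 = border ∨ pvGet grid p.1 p.2 = inner)]
  rw [PySem.List.foldl_congr_mem _ _
      (fun st (p : Int × Int) =>
        if pvGet grid p.1 p.2 = border then pvSet st p.1 p.2 inner
        else if pvGet grid p.1 p.2 = inner then pvSet st p.1 p.2 border
        else st) _ ?_]
  · rw [foldl_nested_pairs]
  · intro acc p hp
    show (if pvGet grid p.1 p.2 = border ∨ pvGet grid p.1 p.2 = inner
          then pvSet acc p.1 p.2 (pvF grid rmin rmax cmin cmax border inner p) else acc)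
        = if pvGet grid p.1 p.2 = border then pvSet acc p.1 p.2 inner
          else if pvGet grid p.1 p.2 = inner then pvSet acc p.1 p.2 border else acc
    obtain ⟨⟨ha, hb⟩, ⟨hx, hy⟩⟩ := (mem_pvPairs _ _ _ _ p.1 p.2).mp hp
    by_cases hvb : pvGet grid p.1 p.2 = border
    · rw [if_pos (Or.inl hvb), if_pos hvb]
      unfold pvF pvColor
      rw [if_pos ⟨by omega, by omega, by omega, by omega⟩, if_pos hvb]
    · by_cases hvi : pvGet grid p.1 p.2 = inner
      · rw [if_pos (Or.inr hvi), if_neg hvb, if_pos hvi]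
        unfold pvF pvColor
        rw [if_pos ⟨by omega, by omega, by omega, by omega⟩, if_neg hvb, if_pos hvi]
      · rw [if_neg (by tauto), if_neg hvb, if_neg hvi]

lemma stage_top (grid : List (List Int)) (rmin rmax cmin cmax border inner : Int)
    (X : List (List Int)) :
    ((PySem.List.pyRange 1 (rmax - rmin - 1 + 1)).flatMap (fun dr =>
        if 0 ≤ rmin - dr then (PySem.List.pyRange cmin (cmax + 1)).map (fun c => (rmin - dr, c))
        else [])).foldl
      (fun acc p => pvSet acc p.1 p.2 (pvF grid rmin rmax cmin cmax border inner p)) X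
    = (PySem.List.pyRange 1 (rmax - rmin - 1 + 1)).foldl (fun res dr =>
        if 0 ≤ rmin - dr then
          (PySem.List.pyRange cmin (cmax + 1)).foldl (fun res c => pvSet res (rmin - dr) c border) res
        else res) X := by
  rw [foldl_flatMap]
  apply PySem.List.foldl_congr_mem
  intro acc dr hdr
  obtain ⟨h1, h2⟩ := PySem.List.mem_pyRange_one.mp hdr
  by_cases hg : 0 ≤ rmin - dr
  · rw [if_pos hg, if_pos hg, List.foldl_map]
    apply PySem.List.foldl_congr_mem
    intro acc2 c hc
    obtain ⟨hx, hy⟩ := PySem.List.mem_pyRange_one.mp hc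
    have : pvF grid rmin rmax cmin cmax border inner (rmin - dr, c) = border := by
      unfold pvF pvColor
      rw [if_neg (by omega), if_pos ⟨⟨by omega, by omega⟩, Or.inl ⟨by omega, by omega⟩⟩]
    rw [this]
  · rw [if_neg hg, if_neg hg]
    rfl

lemma stage_bot (grid : List (List Int)) (rows rmin rmax cmin cmax border inner : Int)
    (X : List (List Int)) :
    ((PySem.List.pyRange 1 (rmax - rmin - 1 + 1)).flatMap (fun dr =>
        if rmax + dr < rows then (PySem.List.pyRange cmin (cmax + 1)).map (fun c => (rmax + dr, c))
        else [])).foldl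
      (fun acc p => pvSet acc p.1 p.2 (pvF grid rmin rmax cmin cmax border inner p)) X
    = (PySem.List.pyRange 1 (rmax - rmin - 1 + 1)).foldl (fun res dr =>
        if rmax + dr < rows then
          (PySem.List.pyRange cmin (cmax + 1)).foldl (fun res c => pvSet res (rmax + dr) c border) res
        else res) X := by
  rw [foldl_flatMap]
  apply PySem.List.foldl_congr_mem
  intro acc dr hdr
  obtain ⟨h1, h2⟩ := PySem.List.mem_pyRange_one.mp hdr
  by_cases hg : rmax + dr < rows
  · rw [if_pos hg, if_pos hg, List.foldl_map]
    apply PySem.List.foldl_congr_mem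
    intro acc2 c hc
    obtain ⟨hx, hy⟩ := PySem.List.mem_pyRange_one.mp hc
    have : pvF grid rmin rmax cmin cmax border inner (rmax + dr, c) = border := by
      unfold pvF pvColor
      rw [if_neg (by omega), if_pos ⟨⟨by omega, by omega⟩, Or.inr ⟨by omega, by omega⟩⟩]
    rw [this]
  · rw [if_neg hg, if_neg hg]
    rfl

lemma stage_left (grid : List (List Int)) (rmin rmax cmin cmax border inner : Int)
    (X : List (List Int)) :
    ((PySem.List.pyRange 1 (cmax - cmin - 1 + 1)).flatMap (fun dc =>
        if 0 ≤ cmin - dc then (PySem.List.pyRange rmin (rmax + 1)).map (fun r => (r, cmin - dc))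
        else [])).foldl
      (fun acc p => pvSet acc p.1 p.2 (pvF grid rmin rmax cmin cmax border inner p)) X
    = (PySem.List.pyRange 1 (cmax - cmin - 1 + 1)).foldl (fun res dc =>
        if 0 ≤ cmin - dc then
          (PySem.List.pyRange rmin (rmax + 1)).foldl (fun res r => pvSet res r (cmin - dc) border) res
        else res) X := by
  rw [foldl_flatMap]
  apply PySem.List.foldl_congr_mem
  intro acc dc hdc
  obtain ⟨h1, h2⟩ := PySem.List.mem_pyRange_one.mp hdc
  by_cases hg : 0 ≤ cmin - dc
  · rw [if_pos hg, if_pos hg, List.foldl_map]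
    apply PySem.List.foldl_congr_mem
    intro acc2 r hr
    obtain ⟨hx, hy⟩ := PySem.List.mem_pyRange_one.mp hr
    have : pvF grid rmin rmax cmin cmax border inner (r, cmin - dc) = border := by
      unfold pvF pvColor
      rw [if_neg (by omega), if_neg (by omega),
          if_pos ⟨⟨by omega, by omega⟩, Or.inl ⟨by omega, by omega⟩⟩]
    rw [this]
  · rw [if_neg hg, if_neg hg]
    rfl

lemma stage_right (grid : List (List Int)) (cols rmin rmax cmin cmax border inner : Int)
    (X : List (List Int)) :
    ((PySem.List.pyRange 1 (cmax - cmin - 1 + 1)).flatMap (fun dc =>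
        if cmax + dc < cols then (PySem.List.pyRange rmin (rmax + 1)).map (fun r => (r, cmax + dc))
        else [])).foldl
      (fun acc p => pvSet acc p.1 p.2 (pvF grid rmin rmax cmin cmax border inner p)) X
    = (PySem.List.pyRange 1 (cmax - cmin - 1 + 1)).foldl (fun res dc =>
        if cmax + dc < cols then
          (PySem.List.pyRange rmin (rmax + 1)).foldl (fun res r => pvSet res r (cmax + dc) border) res
        else res) X := by
  rw [foldl_flatMap]
  apply PySem.List.foldl_congr_mem
  intro acc dc hdc
  obtain ⟨h1, h2⟩ := PySem.List.mem_pyRange_one.mp hdc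
  by_cases hg : cmax + dc < cols
  · rw [if_pos hg, if_pos hg, List.foldl_map]
    apply PySem.List.foldl_congr_mem
    intro acc2 r hr
    obtain ⟨hx, hy⟩ := PySem.List.mem_pyRange_one.mp hr
    have : pvF grid rmin rmax cmin cmax border inner (r, cmax + dc) = border := by
      unfold pvF pvColor
      rw [if_neg (by omega), if_neg (by omega),
          if_pos ⟨⟨by omega, by omega⟩, Or.inr ⟨by omega, by omega⟩⟩]
    rw [this]
  · rw [if_neg hg, if_neg hg]
    rfl

lemma pvPaint_eq_writes (grid : List (List Int)) (rows cols rmin rmax cmin cmax border inner : Int) :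
    pvPaint grid rows cols rmin rmax cmin cmax border inner
      = (pvW grid rows cols rmin rmax cmin cmax border inner).foldl
          (fun acc p => pvSet acc p.1 p.2 (pvF grid rmin rmax cmin cmax border inner p)) grid := by
  show _ = (pvW grid rows cols rmin rmax cmin cmax border inner).foldl _ grid
  unfold pvW
  simp only [List.foldl_append]
  rw [stage_swap, stage_top, stage_bot, stage_left, stage_right]
  unfold pvPaint
  rw [List.map_id']

lemma getD_eq_getElem {α : Type} (G : List α) (d : α) (i : Nat) (h : i < G.length) :
    G.getD i d = G[i] := by
  rw [List.getD_eq_getElem?_getD, List.getElem?_eq_getElem h, Option.getD_some]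

lemma pvGet_cast (G : List (List Int)) (i j : Nat) (hi : i < G.length) (hj : j < G[i].length) :
    pvGet G (i : Int) (j : Int) = G[i][j] := by
  rw [pvGet_nonneg _ _ _ (Int.natCast_nonneg i) (Int.natCast_nonneg j)]
  simp only [Int.toNat_natCast]
  rw [getD_eq_getElem _ _ _ hi, getD_eq_getElem _ _ _ hj]

lemma mem_pvW_iff (grid : List (List Int)) (rows cols rmin rmax cmin cmax border inner i j : Int) :
    (i, j) ∈ pvW grid rows cols rmin rmax cmin cmax border inner ↔
      ((rmin ≤ i ∧ i ≤ rmax ∧ cmin ≤ j ∧ j ≤ cmax) ∧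
        (pvGet grid i j = border ∨ pvGet grid i j = inner))
      ∨ (0 ≤ i ∧ rmin - (rmax - rmin - 1) ≤ i ∧ i < rmin ∧ cmin ≤ j ∧ j ≤ cmax)
      ∨ (i < rows ∧ rmax < i ∧ i ≤ rmax + (rmax - rmin - 1) ∧ cmin ≤ j ∧ j ≤ cmax)
      ∨ (0 ≤ j ∧ cmin - (cmax - cmin - 1) ≤ j ∧ j < cmin ∧ rmin ≤ i ∧ i ≤ rmax)
      ∨ (j < cols ∧ cmax < j ∧ j ≤ cmax + (cmax - cmin - 1) ∧ rmin ≤ i ∧ i ≤ rmax) := by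
  unfold pvW
  simp only [List.mem_append, List.mem_filter, List.mem_flatMap, List.mem_map,
    List.mem_ite_nil_right, mem_pvPairs, PySem.List.mem_pyRange_one, Prod.mk.injEq,
    decide_eq_true_eq]
  constructor
  · intro h
    rcases h with ((((⟨⟨⟨h1, h2⟩, h3, h4⟩, hv⟩ | ⟨dr, hdr, hg, c, hc, he1, he2⟩) |
      ⟨dr, hdr, hg, c, hc, he1, he2⟩) | ⟨dc, hdc, hg, r, hr, he1, he2⟩) |
      ⟨dc, hdc, hg, r, hr, he1, he2⟩)
    · exact Or.inl ⟨⟨h1, by omega, h3, by omega⟩, hv⟩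
    · exact Or.inr (Or.inl (by omega))
    · exact Or.inr (Or.inr (Or.inl (by omega)))
    · exact Or.inr (Or.inr (Or.inr (Or.inl (by omega))))
    · exact Or.inr (Or.inr (Or.inr (Or.inr (by omega))))
  · rintro (⟨⟨h1, h2, h3, h4⟩, hv⟩ | h | h | h | h)
    · exact Or.inl (Or.inl (Or.inl (Or.inl ⟨⟨⟨h1, by omega⟩, h3, by omega⟩, hv⟩)))
    · exact Or.inl (Or.inl (Or.inl (Or.inr
        ⟨rmin - i, ⟨by omega, by omega⟩, by omega, j, ⟨by omega, by omega⟩, by omega, rfl⟩)))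
    · exact Or.inl (Or.inl (Or.inr
        ⟨i - rmax, ⟨by omega, by omega⟩, by omega, j, ⟨by omega, by omega⟩, by omega, rfl⟩))
    · exact Or.inl (Or.inr
        ⟨cmin - j, ⟨by omega, by omega⟩, by omega, i, ⟨by omega, by omega⟩, rfl, by omega⟩)
    · exact Or.inr
        ⟨j - cmax, ⟨by omega, by omega⟩, by omega, i, ⟨by omega, by omega⟩, rfl, by omega⟩

lemma pvGet_natCast (G : List (List Int)) (i j : Nat) :
    pvGet G (i : Int) (j : Int) = (G.getD i []).getD j 0 := by
  rw [pvGet_nonneg _ _ _ (Int.natCast_nonneg i) (Int.natCast_nonneg j)]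
  simp

lemma ext_rows (A B : List (List Int)) (hlen : A.length = B.length)
    (hrow : ∀ i : Nat, i < A.length → (A.getD i []).length = (B.getD i []).length)
    (hcell : ∀ i j : Nat, i < A.length → j < (A.getD i []).length →
      (A.getD i []).getD j 0 = (B.getD i []).getD j 0) : A = B := by
  apply List.ext_getElem hlen
  intro i h1 h2
  apply List.ext_getElem
  · have h := hrow i h1
    rwa [getD_eq_getElem _ _ _ h1, getD_eq_getElem _ _ _ h2] at h
  · intro j hj1 hj2
    have h := hcell i j h1 (by rwa [getD_eq_getElem _ _ _ h1])
    rw [getD_eq_getElem _ _ _ h1, getD_eq_getElem _ _ _ h2] at h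
    rwa [getD_eq_getElem _ _ _ hj1, getD_eq_getElem _ _ _ hj2] at h

lemma render_row_getD (grid : List (List Int)) (rmin rmax cmin cmax border inner : Int)
    (i : Nat) (hi : i < grid.length) :
    (pvRender grid rmin rmax cmin cmax border inner).getD i []
      = (PySem.List.enumerate (grid.getD i [])).map (fun cv : Int × Int =>
          pvColor rmin rmax cmin cmax (rmax - rmin - 1) (cmax - cmin - 1) border inner
            (i : Int) cv.1 cv.2) := by
  simp only [pvRender]
  have hlen : i < ((PySem.List.enumerate grid).map (fun rrow : Int × List Int =>
      (PySem.List.enumerate rrow.2).map (fun cv : Int × Int =>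
        pvColor rmin rmax cmin cmax (rmax - rmin - 1) (cmax - cmin - 1) border inner
          rrow.1 cv.1 cv.2))).length := by
    simpa [PySem.List.length_enumerate] using hi
  rw [getD_eq_getElem _ _ _ hlen, List.getElem_map,
      getElem_enumerate grid [] i (by simpa [PySem.List.length_enumerate] using hi)]
  rw [PySem.List.pyGetD_of_nonneg _ _ (Int.natCast_nonneg i)]
  simp

lemma enum_map_getD (row : List Int) (f : Int → Int → Int) (j : Nat) (hj : j < row.length) :
    ((PySem.List.enumerate row).map (fun cv : Int × Int => f cv.1 cv.2)).getD j 0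
      = f (j : Int) (row.getD j 0) := by
  have hlen : j < ((PySem.List.enumerate row).map (fun cv : Int × Int => f cv.1 cv.2)).length := by
    simpa [PySem.List.length_enumerate] using hj
  rw [getD_eq_getElem _ _ _ hlen, List.getElem_map,
      getElem_enumerate row 0 j (by simpa [PySem.List.length_enumerate] using hj)]
  rw [PySem.List.pyGetD_of_nonneg _ _ (Int.natCast_nonneg j)]
  simp

lemma paint_eq_render (grid : List (List Int)) (rows cols rmin rmax cmin cmax border inner : Int)
    (hrows : rows = (grid.length : Int))
    (hrect : ∀ row ∈ grid, (row.length : Int) = cols)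
    (h0r : 0 ≤ rmin) (hrr : rmin ≤ rmax) (hrm : rmax < rows)
    (h0c : 0 ≤ cmin) (hcc : cmin ≤ cmax) (hcm : cmax < cols) :
    pvPaint grid rows cols rmin rmax cmin cmax border inner
      = pvRender grid rmin rmax cmin cmax border inner := by
  have hW : ∀ p ∈ pvW grid rows cols rmin rmax cmin cmax border inner, 0 ≤ p.1 ∧ 0 ≤ p.2 := by
    intro p hp
    obtain ⟨pi, pj⟩ := p
    rcases (mem_pvW_iff grid rows cols rmin rmax cmin cmax border inner pi pj).mp hp with
      ⟨h, _⟩ | h | h | h | h <;> exact ⟨by omega, by omega⟩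
  rw [pvPaint_eq_writes]
  have hshape := foldl_writes_shape (pvF grid rmin rmax cmin cmax border inner)
    (pvW grid rows cols rmin rmax cmin cmax border inner) grid
  apply ext_rows
  · rw [hshape.1]
    simp [pvRender, PySem.List.length_enumerate]
  · intro i hi
    rw [hshape.1] at hi
    rw [hshape.2 i, render_row_getD grid rmin rmax cmin cmax border inner i hi]
    simp [PySem.List.length_enumerate]
  · intro i j hi hj
    rw [hshape.1] at hi
    rw [hshape.2 i] at hj
    rw [render_row_getD grid rmin rmax cmin cmax border inner i hi,
        enum_map_getD _ _ j hj]
    rw [← pvGet_natCast,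
        pvGet_foldl_writes _ _ _ _ _ hW (Int.natCast_nonneg i) (Int.natCast_nonneg j)]
    have hA : ((i : Int)).toNat < grid.length := by simpa using hi
    have hB : ((j : Int)).toNat < (grid.getD ((i : Int)).toNat []).length := by simpa using hj
    simp only [hA, hB, and_true]
    have hv : pvGet grid (i : Int) (j : Int) = (grid.getD i []).getD j 0 := pvGet_natCast grid i j
    by_cases hmem : ((i : Int), (j : Int)) ∈ pvW grid rows cols rmin rmax cmin cmax border inner
    · rw [if_pos hmem]
      unfold pvF
      rw [hv]
    · rw [if_neg hmem, hv]
      have hIr : (i : Int) < rows := by omega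
      have hJc : (j : Int) < cols := by
        have hmemrow : grid.getD i [] ∈ grid := by
          rw [getD_eq_getElem _ _ _ hi]
          exact List.getElem_mem hi
        have := hrect _ hmemrow
        omega
      have h0i : (0 : Int) ≤ (i : Int) := Int.natCast_nonneg i
      have h0j : (0 : Int) ≤ (j : Int) := Int.natCast_nonneg j
      set v := (grid.getD i []).getD j 0 with hvdef
      unfold pvColor
      by_cases hbox : rmin ≤ (i : Int) ∧ (i : Int) ≤ rmax ∧ cmin ≤ (j : Int) ∧ (j : Int) ≤ cmax
      · rw [if_pos hbox]
        have hvb : ¬ v = border := by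
          intro hb
          exact hmem ((mem_pvW_iff grid rows cols rmin rmax cmin cmax border inner _ _).mpr
            (Or.inl ⟨⟨hbox.1, hbox.2.1, hbox.2.2.1, hbox.2.2.2⟩, Or.inl (by rw [hv]; exact hb)⟩))
        have hvi : ¬ v = inner := by
          intro hb
          exact hmem ((mem_pvW_iff grid rows cols rmin rmax cmin cmax border inner _ _).mpr
            (Or.inl ⟨⟨hbox.1, hbox.2.1, hbox.2.2.1, hbox.2.2.2⟩, Or.inr (by rw [hv]; exact hb)⟩))
        rw [if_neg hvb, if_neg hvi]
      · rw [if_neg hbox]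
        by_cases hs1 : (cmin ≤ (j : Int) ∧ (j : Int) ≤ cmax) ∧
            ((rmin - (rmax - rmin - 1) ≤ (i : Int) ∧ (i : Int) < rmin) ∨
             (rmax < (i : Int) ∧ (i : Int) ≤ rmax + (rmax - rmin - 1)))
        · exfalso
          apply hmem
          apply (mem_pvW_iff grid rows cols rmin rmax cmin cmax border inner _ _).mpr
          rcases hs1.2 with h | h
          · exact Or.inr (Or.inl ⟨h0i, h.1, h.2, hs1.1.1, hs1.1.2⟩)
          · exact Or.inr (Or.inr (Or.inl ⟨hIr, h.1, h.2, hs1.1.1, hs1.1.2⟩))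
        · rw [if_neg hs1]
          by_cases hs2 : (rmin ≤ (i : Int) ∧ (i : Int) ≤ rmax) ∧
              ((cmin - (cmax - cmin - 1) ≤ (j : Int) ∧ (j : Int) < cmin) ∨
               (cmax < (j : Int) ∧ (j : Int) ≤ cmax + (cmax - cmin - 1)))
          · exfalso
            apply hmem
            apply (mem_pvW_iff grid rows cols rmin rmax cmin cmax border inner _ _).mpr
            rcases hs2.2 with h | h
            · exact Or.inr (Or.inr (Or.inr (Or.inl ⟨h0j, h.1, h.2, hs2.1.1, hs2.1.2⟩)))
            · exact Or.inr (Or.inr (Or.inr (Or.inr ⟨hJc, h.1, h.2, hs2.1.1, hs2.1.2⟩)))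
          · rw [if_neg hs2]

-- the single-pass bounding-box update step of B
def pvUpd (bb : Option (Int × Int × Int × Int)) (p : Int × Int) :
    Option (Int × Int × Int × Int) :=
  match bb with
  | none => some (p.1, p.1, p.2, p.2)
  | some (a, b, x, y) => some (min a p.1, max b p.1, min x p.2, max y p.2)

lemma pvBBox_eq_nz (grid : List (List Int)) (cols : Int)
    (hrect : ∀ row ∈ grid, (row.length : Int) = cols) :
    pvBBox grid = (pvNZ grid (grid.length : Int) cols).foldl pvUpd none := by
  unfold pvBBox pvNZ
  rw [PySem.List.enumerate_eq_map_pyRange grid [], List.foldl_map, foldl_flatMap]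
  simp only [PySem.List.len_eq]
  apply PySem.List.foldl_congr_mem
  intro bb r hr
  obtain ⟨hr0, hr1⟩ := PySem.List.mem_pyRange_one.mp hr
  have hrowmem : PySem.List.pyGetD grid r [] ∈ grid := by
    rw [PySem.List.pyGetD_eq_getElem grid [] hr0 (by exact_mod_cast hr1)]
    exact List.getElem_mem _
  have hrlen : ((PySem.List.pyGetD grid r []).length : Int) = cols := hrect _ hrowmem
  show (PySem.List.enumerate (PySem.List.pyGetD grid r [])).foldl _ bb = _
  rw [PySem.List.enumerate_eq_map_pyRange (PySem.List.pyGetD grid r []) 0, List.foldl_map,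
      List.foldl_map, ← foldl_if_filter_prop _ (fun c => pvGet grid r c ≠ 0)]
  simp only [PySem.List.len_eq, hrlen]
  rfl

lemma bb_fold_some (ps : List (Int × Int)) (a b x y : Int) :
    ps.foldl pvUpd (some (a, b, x, y))
      = some ((ps.map Prod.fst).foldl min a, (ps.map Prod.fst).foldl max b,
              (ps.map Prod.snd).foldl min x, (ps.map Prod.snd).foldl max y) := by
  induction ps generalizing a b x y with
  | nil => rfl
  | cons p t ih => simp [pvUpd, ih]

lemma mem_pvNZ (grid : List (List Int)) (rows cols : Int) (q : Int × Int)
    (hq : q ∈ pvNZ grid rows cols) :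
    (0 ≤ q.1 ∧ q.1 < rows) ∧ (0 ≤ q.2 ∧ q.2 < cols) := by
  obtain ⟨q1, q2⟩ := q
  simp [pvNZ, List.mem_flatMap, PySem.List.mem_pyRange_one] at hq
  tauto

-- ===== VERDICT (by name: the statement is the Claim_ definition above) =====
theorem transform_spec : Claim_equal_transform := by
  intro grid hdom hpre
  obtain ⟨hne, hrect0, row0, hrow0, v0, hv0mem, hv0ne⟩ := hpre
  unfold Spec_transform
  have hrect : ∀ row ∈ grid, (row.length : Int)
      = ((PySem.List.pyGetD grid 0 []).length : Int) := by
    intro row hrow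
    have h1 := hrect0 row hrow
    have hhead : grid.headD [] = PySem.List.pyGetD grid 0 [] := by
      cases grid with
      | nil => exact absurd rfl hne
      | cons h t =>
        rw [PySem.List.pyGetD_of_nonneg _ _ (by omega)]
        rfl
    rw [hhead] at h1
    exact_mod_cast h1
  obtain ⟨r0, hr0len, hr0⟩ := List.mem_iff_getElem.mp hrow0
  obtain ⟨c0, hc0len, hc0⟩ := List.mem_iff_getElem.mp hv0mem
  have hmemnz : ((r0 : Int), (c0 : Int)) ∈ pvNZ grid (grid.length : Int)
      ((PySem.List.pyGetD grid 0 []).length : Int) := by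
    have hcell : pvGet grid (r0 : Int) (c0 : Int) ≠ 0 := by
      rw [pvGet_cast grid r0 c0 hr0len (by rw [hr0]; exact hc0len)]
      intro h
      apply hv0ne
      rw [← hc0]
      conv_rhs => rw [← h]
      congr 1
      exact hr0.symm
    have hc0cols : (c0 : Int) < ((PySem.List.pyGetD grid 0 []).length : Int) := by
      have := hrect (grid[r0]) (List.getElem_mem hr0len)
      rw [hr0] at this
      omega
    simp only [pvNZ, List.mem_flatMap, List.mem_map, List.mem_filter,
      PySem.List.mem_pyRange_one, decide_eq_true_eq]
    exact ⟨(r0 : Int), ⟨Int.natCast_nonneg r0, by exact_mod_cast hr0len⟩,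
      (c0 : Int), ⟨⟨Int.natCast_nonneg c0, hc0cols⟩, hcell⟩, rfl⟩
  cases hnz : pvNZ grid (grid.length : Int) ((PySem.List.pyGetD grid 0 []).length : Int) with
  | nil => rw [hnz] at hmemnz; exact absurd hmemnz (List.not_mem_nil)
  | cons p t =>
    have hmem' : ∀ q ∈ p :: t,
        (0 ≤ q.1 ∧ q.1 < (grid.length : Int)) ∧
        (0 ≤ q.2 ∧ q.2 < ((PySem.List.pyGetD grid 0 []).length : Int)) := by
      intro q hq
      exact mem_pvNZ grid _ _ q (by rw [hnz]; exact hq)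
    have hminr : PySem.List.min? ((pvNZ grid (grid.length : Int)
        ((PySem.List.pyGetD grid 0 []).length : Int)).map Prod.fst) (fun y => y)
        = some ((t.map Prod.fst).foldl min p.1) := by
      rw [hnz, List.map_cons, PySem.List.min?_id_cons]
    have hmaxr : PySem.List.max? ((pvNZ grid (grid.length : Int)
        ((PySem.List.pyGetD grid 0 []).length : Int)).map Prod.fst) (fun y => y)
        = some ((t.map Prod.fst).foldl max p.1) := by
      rw [hnz, List.map_cons, PySem.List.max?_id_cons]
    have hminc : PySem.List.min? ((pvNZ grid (grid.length : Int)
        ((PySem.List.pyGetD grid 0 []).length : Int)).map Prod.snd) (fun y => y)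
        = some ((t.map Prod.snd).foldl min p.2) := by
      rw [hnz, List.map_cons, PySem.List.min?_id_cons]
    have hmaxc : PySem.List.max? ((pvNZ grid (grid.length : Int)
        ((PySem.List.pyGetD grid 0 []).length : Int)).map Prod.snd) (fun y => y)
        = some ((t.map Prod.snd).foldl max p.2) := by
      rw [hnz, List.map_cons, PySem.List.max?_id_cons]
    have hbb : pvBBox grid = some ((t.map Prod.fst).foldl min p.1,
        (t.map Prod.fst).foldl max p.1, (t.map Prod.snd).foldl min p.2,
        (t.map Prod.snd).foldl max p.2) := by
      rw [pvBBox_eq_nz grid _ hrect, hnz, List.foldl_cons]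
      show t.foldl pvUpd (some (p.1, p.1, p.2, p.2)) = _
      rw [bb_fold_some]
    -- bounds for the extrema
    have hminr_mem : (t.map Prod.fst).foldl min p.1 = p.1
        ∨ (t.map Prod.fst).foldl min p.1 ∈ t.map Prod.fst :=
      PySem.List.foldl_min_mem _ _
    have hmaxr_mem := PySem.List.foldl_max_mem (t.map Prod.fst) p.1
    have hminc_mem := PySem.List.foldl_min_mem (t.map Prod.snd) p.2
    have hmaxc_mem := PySem.List.foldl_max_mem (t.map Prod.snd) p.2
    have hfst_bound : ∀ x ∈ (p :: t).map Prod.fst, 0 ≤ x ∧ x < (grid.length : Int) := by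
      intro x hx
      obtain ⟨q, hq, rfl⟩ := List.mem_map.mp hx
      exact (hmem' q hq).1
    have hsnd_bound : ∀ x ∈ (p :: t).map Prod.snd,
        0 ≤ x ∧ x < ((PySem.List.pyGetD grid 0 []).length : Int) := by
      intro x hx
      obtain ⟨q, hq, rfl⟩ := List.mem_map.mp hx
      exact (hmem' q hq).2
    have h0r : 0 ≤ (t.map Prod.fst).foldl min p.1 := by
      rcases hminr_mem with h | h
      · rw [h]; exact (hfst_bound p.1 (by simp)).1
      · exact (hfst_bound _ (by simp [h])).1
    have hrm : (t.map Prod.fst).foldl max p.1 < (grid.length : Int) := by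
      rcases hmaxr_mem with h | h
      · rw [h]; exact (hfst_bound p.1 (by simp)).2
      · exact (hfst_bound _ (by simp [h])).2
    have h0c : 0 ≤ (t.map Prod.snd).foldl min p.2 := by
      rcases hminc_mem with h | h
      · rw [h]; exact (hsnd_bound p.2 (by simp)).1
      · exact (hsnd_bound _ (by simp [h])).1
    have hcm : (t.map Prod.snd).foldl max p.2 < ((PySem.List.pyGetD grid 0 []).length : Int) := by
      rcases hmaxc_mem with h | h
      · rw [h]; exact (hsnd_bound p.2 (by simp)).2
      · exact (hsnd_bound _ (by simp [h])).2
    have hrr : (t.map Prod.fst).foldl min p.1 ≤ (t.map Prod.fst).foldl max p.1 :=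
      le_trans (PySem.List.foldl_min_le (t.map Prod.fst) p.1).1
        (PySem.List.le_foldl_max (t.map Prod.fst) p.1).1
    have hcc : (t.map Prod.snd).foldl min p.2 ≤ (t.map Prod.snd).foldl max p.2 :=
      le_trans (PySem.List.foldl_min_le (t.map Prod.snd) p.2).1
        (PySem.List.le_foldl_max (t.map Prod.snd) p.2).1
    -- reduce both programs
    show transform grid = transform_alt grid
    unfold transform transform_alt
    simp only [hminr, hmaxr, hminc, hmaxc, hbb]
    rw [List.head?_map, List.head?_filter]
    cases hfind : (pvPairs ((t.map Prod.fst).foldl min p.1 + 1) ((t.map Prod.fst).foldl max p.1)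
        (((t.map Prod.snd).foldl min p.2) + 1) ((t.map Prod.snd).foldl max p.2)).find?
        (fun q => decide (pvGet grid q.1 q.2
          ≠ pvGet grid ((t.map Prod.fst).foldl min p.1) ((t.map Prod.snd).foldl min p.2))) with
    | none => rfl
    | some q =>
      simp only [Option.map_some]
      exact paint_eq_render grid _ _ _ _ _ _ _ _ rfl hrect h0r hrr hrm h0c hcc hcm
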